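-- pv_equiv track=rewrite | github.com/bhardwajRahul/OpenJarvis | src/openjarvis/evals/datasets/adp.py | _extract_problem_reference
-- ===== SOURCE A (Python) =====
-- from typing import Iterable, List, MutableMapping, Optional
--
-- def _extract_problem_reference(
--     turns: List[MutableMapping[str, object]],
-- ) -> tuple[Optional[str], str]:
--     """Return (problem, reference) from a list of trajectory turns.
--
--     problem   = content of the first user-sourced turn
--     reference = content of the last message_action turn (agent's final output),
--                 truncated to 2000 chars; falls back to the last non-user turn
--     """
--     problem: Optional[str] = None
--     for turn in turns:
--         if turn.get("source") == "user":
--             text = str(turn.get("content") or "").strip()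
--             if text:
--                 problem = text
--                 break
--
--     reference = ""
--     # Prefer the last message_action (the agent's final response/finish action)
--     for turn in reversed(turns):
--         if turn.get("class_") == "message_action":
--             text = str(turn.get("content") or "").strip()
--             if text:
--                 reference = text[:2000]
--                 break
--     if not reference:
--         # Fallback: last non-user turn of any class
--         for turn in reversed(turns):
--             if turn.get("source") != "user":
--                 text = str(turn.get("content") or "").strip()
--                 if text:
--                     reference = text[:2000]
--                     break
--
--     return problem, reference
-- ===== SOURCE B (Python) =====
-- from typing import List, MutableMapping, Optional
--
--
-- def _extract_problem_reference(
--     turns: List[MutableMapping[str, object]],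
-- ) -> tuple[Optional[str], str]:
--     # problem: first user-sourced turn with non-empty stripped content
--     problem = next(
--         (
--             str(turn.get("content") or "").strip()
--             for turn in turns
--             if turn.get("source") == "user"
--             and str(turn.get("content") or "").strip()
--         ),
--         None,
--     )
--
--     # ONE reverse pass maintaining both candidates, each assigned at most once
--     ma_ref: Optional[str] = None
--     any_ref: Optional[str] = None
--     for turn in reversed(turns):
--         text = str(turn.get("content") or "").strip()
--         if not text:
--             continue
--         if ma_ref is None and turn.get("class_") == "message_action":
--             ma_ref = text[:2000]
--         if any_ref is None and turn.get("source") != "user":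
--             any_ref = text[:2000]
--
--     reference = ma_ref if ma_ref is not None else (any_ref if any_ref is not None else "")
--     return problem, reference
-- ===== Notes on version B (the rewrite author's own statement) =====
-- stated objective: alternative
-- what changed: A's two separate reverse scans over turns (message_action first, then a fallback scan for non-user turns) are fused into one reverse pass maintaining two assign-once candidates, and the forward problem loop becomes a next()/find-first expression; same O(n) cost.
import Mathlib
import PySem

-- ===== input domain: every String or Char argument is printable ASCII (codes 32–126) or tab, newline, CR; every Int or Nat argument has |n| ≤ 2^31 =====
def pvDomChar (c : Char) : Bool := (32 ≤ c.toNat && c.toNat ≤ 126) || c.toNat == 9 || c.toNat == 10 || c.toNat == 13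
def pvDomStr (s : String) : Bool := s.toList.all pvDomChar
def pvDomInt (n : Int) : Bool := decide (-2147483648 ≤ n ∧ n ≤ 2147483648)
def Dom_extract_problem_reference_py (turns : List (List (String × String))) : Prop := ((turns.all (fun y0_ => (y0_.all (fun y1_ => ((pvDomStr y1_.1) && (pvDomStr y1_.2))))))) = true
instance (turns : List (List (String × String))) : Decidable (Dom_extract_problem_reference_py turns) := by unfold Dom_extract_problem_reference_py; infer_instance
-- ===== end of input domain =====

-- B fuses A's two reverse scans into ONE reverse pass keeping both candidates (objective: alternative decomposition, not faster).

-- ===== PORT A =====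
-- str(turn.get("content") or "").strip()  (values are str here, so `or ""` is getD "")
def pvA_text (turn : List (String × String)) : String :=
  PySem.Str.strip ((PySem.Dict.mk turn).getD "content" "")

-- first forward loop (break on first user turn with non-empty stripped content)
def pvA_findProblem : List (List (String × String)) → Option String
  | [] => none
  | turn :: rest =>
    if (PySem.Dict.mk turn).get? "source" == some "user" then
      let text := pvA_text turn
      if text ≠ "" then some text else pvA_findProblem rest
    else pvA_findProblem rest

-- first reverse loop (over reversed(turns)): last message_action with non-empty text
def pvA_refMA : List (List (String × String)) → String
  | [] => ""
  | turn :: rest =>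
    if (PySem.Dict.mk turn).get? "class_" == some "message_action" then
      let text := pvA_text turn
      if text ≠ "" then PySem.Str.slice text none (some 2000) else pvA_refMA rest
    else pvA_refMA rest

-- second reverse loop: last non-user turn with non-empty text
def pvA_refNU : List (List (String × String)) → String
  | [] => ""
  | turn :: rest =>
    if ¬ ((PySem.Dict.mk turn).get? "source" == some "user") then
      let text := pvA_text turn
      if text ≠ "" then PySem.Str.slice text none (some 2000) else pvA_refNU rest
    else pvA_refNU rest

def extract_problem_reference_py (turns : List (List (String × String))) : Option String × String :=
  let problem := pvA_findProblem turns
  let reference := pvA_refMA turns.reverse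
  let reference := if reference = "" then pvA_refNU turns.reverse else reference
  (problem, reference)

-- ===== PORT B =====
def pvB_text (turn : List (String × String)) : String :=
  PySem.Str.strip ((PySem.Dict.mk turn).getD "content" "")

-- the single reverse pass: two assign-once accumulators
def pvB_scan : List (List (String × String)) → Option String → Option String → Option String × Option String
  | [], ma, anyr => (ma, anyr)
  | turn :: rest, ma, anyr =>
    let text := pvB_text turn
    if text = "" then pvB_scan rest ma anyr
    else
      let ma' := if ma.isNone && ((PySem.Dict.mk turn).get? "class_" == some "message_action")
                 then some (PySem.Str.slice text none (some 2000)) else ma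
      let anyr' := if anyr.isNone && !((PySem.Dict.mk turn).get? "source" == some "user")
                 then some (PySem.Str.slice text none (some 2000)) else anyr
      pvB_scan rest ma' anyr'

def extract_problem_reference_py_alt (turns : List (List (String × String))) : Option String × String :=
  let problem := (turns.find? (fun turn =>
      ((PySem.Dict.mk turn).get? "source" == some "user") && !(pvB_text turn == ""))).map pvB_text
  let p := pvB_scan turns.reverse none none
  (problem, (p.1.getD (p.2.getD "")))

-- ===== PRECONDITION & SPEC =====
def Spec_extract_problem_reference_py (turns : List (List (String × String))) (out : Option String × String) : Prop := out = extract_problem_reference_py_alt turns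
instance (turns : List (List (String × String))) (out : Option String × String) : Decidable (Spec_extract_problem_reference_py turns out) := by unfold Spec_extract_problem_reference_py; infer_instance

-- ===== CLAIM (what is proved, stated in full; the proofs are below) =====
def Claim_equal_extract_problem_reference_py : Prop := ∀ (turns : List (List (String × String))), Dom_extract_problem_reference_py turns → Spec_extract_problem_reference_py turns (extract_problem_reference_py turns)

-- ===== LEMMAS AND PROOFS =====

-- proof-side option-valued versions of A's two reverse scans
def pvMAOpt : List (List (String × String)) → Option String
  | [] => none
  | turn :: rest =>
    if ((PySem.Dict.mk turn).get? "class_" == some "message_action") && !(pvB_text turn == "")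
    then some (PySem.Str.slice (pvB_text turn) none (some 2000)) else pvMAOpt rest

def pvNUOpt : List (List (String × String)) → Option String
  | [] => none
  | turn :: rest =>
    if !((PySem.Dict.mk turn).get? "source" == some "user") && !(pvB_text turn == "")
    then some (PySem.Str.slice (pvB_text turn) none (some 2000)) else pvNUOpt rest

lemma pvB_scan_eq (l : List (List (String × String))) :
    ∀ ma anyr, pvB_scan l ma anyr = (ma.or (pvMAOpt l), anyr.or (pvNUOpt l)) := by
  induction l with
  | nil => intro ma anyr; simp [pvB_scan, pvMAOpt, pvNUOpt]
  | cons turn rest ih =>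
    intro ma anyr
    simp only [pvB_scan, pvMAOpt, pvNUOpt]
    by_cases ht : pvB_text turn = ""
    · simp [ht, ih]
    · simp only [if_neg ht, ih]
      cases ma <;> cases anyr <;> simp [ht] <;> split_ifs <;> simp

lemma pvA_refMA_eq (l : List (List (String × String))) :
    pvA_refMA l = (pvMAOpt l).getD "" := by
  induction l with
  | nil => rfl
  | cons turn rest ih =>
    simp only [pvA_refMA, pvMAOpt, pvB_text, pvA_text]
    by_cases hc : (PySem.Dict.mk turn).get? "class_" == some "message_action" <;>
      by_cases ht : PySem.Str.strip ((PySem.Dict.mk turn).getD "content" "") = "" <;>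
      simp [hc, ht, ih]

lemma pvA_refNU_eq (l : List (List (String × String))) :
    pvA_refNU l = (pvNUOpt l).getD "" := by
  induction l with
  | nil => rfl
  | cons turn rest ih =>
    simp only [pvA_refNU, pvNUOpt, pvB_text, pvA_text]
    by_cases hc : (PySem.Dict.mk turn).get? "source" == some "user" <;>
      by_cases ht : PySem.Str.strip ((PySem.Dict.mk turn).getD "content" "") = "" <;>
      simp [hc, ht, ih]

lemma pvSlice_ne_empty (s : String) (hs : s ≠ "") :
    PySem.Str.slice s none (some 2000) ≠ "" := by
  intro h
  have h' := congrArg String.toList h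
  rw [PySem.Str.toList_slice] at h'
  simp only [PySem.Chars.slice_eq_listSlice] at h'
  rw [show ((2000:Int)) = ((2000:Nat):Int) by norm_num, PySem.List.slice_to_natCast] at h'
  have hl : s.toList ≠ [] := by simpa using hs
  cases hne : s.toList with
  | nil => exact hl hne
  | cons a t => rw [hne] at h'; simp at h'

lemma pvMAOpt_ne (l : List (List (String × String))) (s : String)
    (h : pvMAOpt l = some s) : s ≠ "" := by
  induction l with
  | nil => simp [pvMAOpt] at h
  | cons turn rest ih =>
    rw [pvMAOpt] at h
    by_cases hcond : (((PySem.Dict.mk turn).get? "class_" == some "message_action") && !(pvB_text turn == "")) = true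
    · rw [if_pos hcond] at h
      have ht : pvB_text turn ≠ "" := by
        intro he; rw [he] at hcond; simp at hcond
      rw [Option.some_inj] at h
      subst h
      exact pvSlice_ne_empty _ ht
    · rw [if_neg hcond] at h
      exact ih h

lemma pvProblem_eq (l : List (List (String × String))) :
    pvA_findProblem l = (l.find? (fun turn =>
      ((PySem.Dict.mk turn).get? "source" == some "user") && !(pvB_text turn == ""))).map pvB_text := by
  induction l with
  | nil => rfl
  | cons turn rest ih =>
    rw [pvA_findProblem, show pvA_text = pvB_text from rfl]
    by_cases hc : ((PySem.Dict.mk turn).get? "source" == some "user") = true <;>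
      by_cases ht : pvB_text turn = ""
    · rw [List.find?_cons_of_neg (by simp [hc, ht])]
      simp [hc, ht, ih]
    · rw [List.find?_cons_of_pos (by simp [hc, ht])]
      simp [hc, ht]
    · rw [List.find?_cons_of_neg (by simp [hc])]
      simp [hc, ih]
    · rw [List.find?_cons_of_neg (by simp [hc])]
      simp [hc, ih]

-- ===== VERDICT (by name: the statement is the Claim_ definition above) =====
theorem extract_problem_reference_py_spec : Claim_equal_extract_problem_reference_py := by
  intro turns _
  unfold Spec_extract_problem_reference_py extract_problem_reference_py extract_problem_reference_py_alt
  rw [pvB_scan_eq, pvProblem_eq, pvA_refMA_eq, pvA_refNU_eq]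
  cases hma : pvMAOpt turns.reverse with
  | none => simp
  | some s => simp [pvMAOpt_ne _ _ hma]
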